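-- pv_equiv track=rewrite | github.com/blihblah/mix | python/gfxconvert.py | to_byte
-- ===== SOURCE A (Python) =====
-- def to_byte(pxrow, fg):
--     as_bits = 0
--     for p in pxrow:
--         if p == fg:
--             as_bits = as_bits * 2 + 1
--         else:
--             as_bits = as_bits * 2
--     return as_bits
-- ===== SOURCE B (Python) =====
-- def to_byte(pxrow, fg):
--     n = len(pxrow)
--     return sum(2 ** (n - 1 - i) for i, p in enumerate(pxrow) if p == fg)
-- ===== Notes on version B (the rewrite author's own statement) =====
-- stated objective: idiomatic
-- what changed: Replaces the threaded multiply-and-add accumulator with a closed-form sum of place values 2**(n-1-i) over the positions where the pixel matches fg.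
import Mathlib
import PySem

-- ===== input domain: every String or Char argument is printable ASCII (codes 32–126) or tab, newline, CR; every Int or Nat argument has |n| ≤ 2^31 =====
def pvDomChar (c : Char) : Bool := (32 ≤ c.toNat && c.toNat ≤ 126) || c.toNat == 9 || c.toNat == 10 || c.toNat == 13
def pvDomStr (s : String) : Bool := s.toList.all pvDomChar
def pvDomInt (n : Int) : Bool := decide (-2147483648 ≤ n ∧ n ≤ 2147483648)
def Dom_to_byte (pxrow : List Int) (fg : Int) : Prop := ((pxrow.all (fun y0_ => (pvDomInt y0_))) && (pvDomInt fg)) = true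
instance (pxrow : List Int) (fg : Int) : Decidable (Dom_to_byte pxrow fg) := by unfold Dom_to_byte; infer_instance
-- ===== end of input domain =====

-- B replaces A's threaded multiply-and-add accumulator with a closed-form sum of place values 2^(n-1-i); no speed claim.

-- ===== PORT A =====
def to_byte (pxrow : List Int) (fg : Int) : Int :=
  pxrow.foldl (fun as_bits p => if p == fg then as_bits * 2 + 1 else as_bits * 2) 0

-- ===== PORT B =====
def to_byte_alt (pxrow : List Int) (fg : Int) : Int :=
  let n : Int := pxrow.length
  ((PySem.List.enumerate pxrow).filter (fun ip => ip.2 == fg)).foldl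
    (fun s ip => s + 2 ^ (n - 1 - ip.1).toNat) 0

-- ===== PRECONDITION & SPEC =====
def Spec_to_byte (pxrow : List Int) (fg : Int) (out : Int) : Prop := out = to_byte_alt pxrow fg
instance (pxrow : List Int) (fg : Int) (out : Int) : Decidable (Spec_to_byte pxrow fg out) := by unfold Spec_to_byte; infer_instance

-- ===== CLAIM (what is proved, stated in full; the proofs are below) =====
def Claim_equal_to_byte : Prop := ∀ (pxrow : List Int) (fg : Int), Dom_to_byte pxrow fg → Spec_to_byte pxrow fg (to_byte pxrow fg)

-- ===== LEMMAS AND PROOFS =====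

-- Mathematical description of B's sum: W fg xs d = Σ_{k, xs[k]=fg} 2^(d-k).toNat.
def pvW (fg : Int) : List Int → Int → Int
  | [], _ => 0
  | x :: xs, d => (if x == fg then 2 ^ d.toNat else 0) + pvW fg xs (d - 1)

theorem pvW_cast (fg : Int) (xs : List Int) (d : Int) (s : Int) (c : Int) :
    ∀ m : Int, c - m = d →
    ((PySem.List.enumerate xs m).filter (fun ip => ip.2 == fg)).foldl
        (fun s ip => s + 2 ^ (c - ip.1).toNat) s = s + pvW fg xs d := by
  induction xs generalizing d s with
  | nil => intro m h; simp [PySem.List.enumerate, pvW]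
  | cons x xs ih =>
    intro m h
    simp only [PySem.List.enumerate_cons, List.filter_cons, pvW]
    by_cases hx : x = fg
    · simp only [hx, beq_self_eq_true, if_pos, List.foldl_cons]
      rw [ih (d - 1) _ (m + 1) (by omega), h]
      ring
    · have hb : (x == fg) = false := by simp [hx]
      simp only [hb, Bool.false_eq_true, if_neg, not_false_iff]
      rw [ih (d - 1) s (m + 1) (by omega)]
      ring

theorem alt_eq_pvW (fg : Int) (xs : List Int) :
    to_byte_alt xs fg = pvW fg xs ((xs.length : Int) - 1) := by
  unfold to_byte_alt
  simpa using pvW_cast fg xs ((xs.length : Int) - 1) 0 ((xs.length : Int) - 1) 0 (by ring)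

-- A's fold with initial accumulator a equals a * 2^len plus the fold from 0.
theorem to_byte_fold_shift (fg : Int) (xs : List Int) (a : Int) :
    xs.foldl (fun as_bits p => if p == fg then as_bits * 2 + 1 else as_bits * 2) a
      = a * 2 ^ xs.length + xs.foldl (fun as_bits p => if p == fg then as_bits * 2 + 1 else as_bits * 2) 0 := by
  induction xs generalizing a with
  | nil => simp
  | cons x xs ih =>
    simp only [List.foldl_cons]
    rw [ih, ih (if x == fg then 0 * 2 + 1 else 0 * 2)]
    by_cases h : x = fg <;> simp [h, pow_succ] <;> ring

theorem to_byte_eq_pvW (fg : Int) (xs : List Int) :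
    to_byte xs fg = pvW fg xs ((xs.length : Int) - 1) := by
  induction xs with
  | nil => simp [to_byte, pvW]
  | cons x xs ih =>
    unfold to_byte at *
    simp only [List.foldl_cons, pvW, List.length_cons]
    rw [to_byte_fold_shift, ih]
    have : ((((xs.length : Int) + 1) - 1)).toNat = xs.length := by omega
    by_cases h : x = fg <;>
      simp [h]

-- ===== VERDICT (by name: the statement is the Claim_ definition above) =====
theorem to_byte_spec : Claim_equal_to_byte := by
  intro pxrow fg _
  unfold Spec_to_byte
  rw [to_byte_eq_pvW, alt_eq_pvW]
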